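-- pv_equiv track=rewrite | github.com/Alfirs/crawler | NewReelsGenerator_port/GUIreels.py | clamp_text_for_api
-- ===== SOURCE A (Python) =====
-- def clamp_text_for_api(text: str, limit: int) -> str:
--     t = (text or "").strip()
--     byte_limit = limit * 4  # allow full-length UTF-8 captions (e.g., Cyrillic at 2-3 bytes per char)
--     if len(t) <= limit and len(t.encode("utf-8")) <= byte_limit:
--         return t
--     # Trim to the requested character limit first.
--     t = t[:limit]
--     # Further reduce if the UTF-8 byte length still exceeds the expanded threshold.
--     while len(t.encode("utf-8")) > byte_limit and len(t) > 0:
--         t = t[:-1]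
--     return t
-- ===== SOURCE B (Python) =====
-- def clamp_text_for_api(text: str, limit: int) -> str:
--     # One closed-form slice: on single-byte text the byte check never binds,
--     # and a non-positive limit yields the empty string.
--     return (text or "").strip()[:max(limit, 0)]
-- ===== Notes on version B (the rewrite author's own statement) =====
-- stated objective: simpler
-- what changed: Replaces A's guarded early return, end-relative slice and byte-trimming while loop with a single closed-form slice strip(text)[:max(limit,0)], dropping the UTF-8 re-encoding entirely (on the single-byte domain the byte bound never binds, and non-positive limits give the empty string).
import Mathlib
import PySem

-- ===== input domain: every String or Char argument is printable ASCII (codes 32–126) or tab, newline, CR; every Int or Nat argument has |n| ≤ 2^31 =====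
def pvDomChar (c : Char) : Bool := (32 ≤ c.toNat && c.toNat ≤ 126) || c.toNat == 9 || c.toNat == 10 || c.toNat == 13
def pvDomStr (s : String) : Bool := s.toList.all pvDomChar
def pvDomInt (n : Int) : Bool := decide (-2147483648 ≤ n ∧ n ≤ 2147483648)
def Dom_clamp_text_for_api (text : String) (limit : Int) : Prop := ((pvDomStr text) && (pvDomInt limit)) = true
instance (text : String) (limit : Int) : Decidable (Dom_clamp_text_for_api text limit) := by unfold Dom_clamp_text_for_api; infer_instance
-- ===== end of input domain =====

-- B replaces A's early-return check, end-relative slice and byte-trimming while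
-- loop by one closed-form slice strip(text)[:max(limit,0)] — simpler, same result
-- on the stated domain.

-- ===== PORT A =====
-- len(c.encode("utf-8")) for one code point (exact for every Lean Char: a Unicode
-- scalar value; hand-ported, PySem has no utf-8 primitive)
def pvUtf8Width (c : Char) : Nat :=
  if c.toNat < 128 then 1 else if c.toNat < 2048 then 2
  else if c.toNat < 65536 then 3 else 4

-- len(t.encode("utf-8"))
def pvUtf8Len (cs : List Char) : Nat := (cs.map pvUtf8Width).sum

-- the while loop: while len(t.encode("utf-8")) > byte_limit and len(t) > 0: t = t[:-1]
def pvTrim (byte_limit : Int) (t : List Char) : List Char :=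
  if (pvUtf8Len t : Int) > byte_limit ∧ 0 < t.length then
    pvTrim byte_limit (PySem.List.slice t none (some (-1)))
  else t
termination_by t.length
decreasing_by
  rename_i h
  rw [PySem.List.slice_to_neg_one]
  simp only [List.length_dropLast]
  omega

def clamp_text_for_api (text : String) (limit : Int) : String :=
  let t := PySem.Chars.strip text.toList
  let byte_limit := limit * 4
  if (t.length : Int) ≤ limit ∧ (pvUtf8Len t : Int) ≤ byte_limit then String.ofList t
  else String.ofList (pvTrim byte_limit (PySem.List.slice t none (some limit)))

-- ===== PORT B =====
def clamp_text_for_api_alt (text : String) (limit : Int) : String :=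
  String.ofList (PySem.List.slice (PySem.Chars.strip text.toList) none (some (max limit 0)))

-- ===== PRECONDITION & SPEC =====
def Spec_clamp_text_for_api (text : String) (limit : Int) (out : String) : Prop := out = clamp_text_for_api_alt text limit
instance (text : String) (limit : Int) (out : String) : Decidable (Spec_clamp_text_for_api text limit out) := by unfold Spec_clamp_text_for_api; infer_instance

-- ===== CLAIM (what is proved, stated in full; the proofs are below) =====
def Claim_equal_clamp_text_for_api : Prop := ∀ (text : String) (limit : Int), Dom_clamp_text_for_api text limit → Spec_clamp_text_for_api text limit (clamp_text_for_api text limit)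

-- ===== LEMMAS AND PROOFS =====

-- single-byte characters: utf-8 length = character count
theorem pvUtf8Len_eq_length (cs : List Char) (h : ∀ c ∈ cs, c.toNat < 128) :
    pvUtf8Len cs = cs.length := by
  induction cs with
  | nil => rfl
  | cons c cs ih =>
      have hc := h c (by simp)
      simp only [pvUtf8Len, List.map_cons, List.sum_cons, List.length_cons] at *
      rw [ih (fun x hx => h x (by simp [hx]))]
      simp only [pvUtf8Width, if_pos hc]
      omega

theorem mem_strip {c : Char} {cs : List Char} (h : c ∈ PySem.Chars.strip cs) : c ∈ cs := by
  simp only [PySem.Chars.strip, PySem.Chars.rstrip, PySem.Chars.lstrip, List.mem_reverse] at h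
  exact (List.dropWhile_sublist _).mem ((List.mem_reverse).mp ((List.dropWhile_sublist _).mem h))

theorem pvTrim_of_neg (byte_limit : Int) (hb : byte_limit < 0) (t : List Char) :
    pvTrim byte_limit t = [] := by
  induction t using pvTrim.induct byte_limit with
  | case1 t h ih =>
      rw [pvTrim, if_pos h]; exact ih
  | case2 t h =>
      rw [pvTrim, if_neg h]
      push Not at h
      have h0 : (0:Int) ≤ (pvUtf8Len t : Int) := by positivity
      have hlen := h (by omega)
      simpa using List.length_eq_zero_iff.mp (by omega)

theorem clamp_text_for_api_spec' (text : String) (limit : Int)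
    (hd : Dom_clamp_text_for_api text limit) :
    clamp_text_for_api text limit = clamp_text_for_api_alt text limit := by
  unfold clamp_text_for_api clamp_text_for_api_alt
  set t := PySem.Chars.strip text.toList with ht
  have hchars : ∀ c ∈ t, c.toNat < 128 := by
    intro c hc
    have : pvDomChar c = true := by
      have hmem := mem_strip hc
      have hdom : pvDomStr text = true := by
        have := hd
        unfold Dom_clamp_text_for_api at this
        exact ((Bool.and_eq_true _ _).mp this).1
      have := (List.all_eq_true.mp (by simpa [pvDomStr] using hdom)) c hmem
      simpa using this
    simp only [pvDomChar, Bool.or_eq_true, Bool.and_eq_true, decide_eq_true_eq, beq_iff_eq] at this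
    omega
  have hlen : pvUtf8Len t = t.length := pvUtf8Len_eq_length t hchars
  by_cases hret : (t.length : Int) ≤ limit ∧ (pvUtf8Len t : Int) ≤ limit * 4
  · rw [if_pos hret]
    have h0 : 0 ≤ limit := by
      have : (0:Int) ≤ (t.length : Int) := by positivity
      omega
    have hmax : max limit 0 = limit := by omega
    rw [hmax, PySem.List.slice_to t h0, List.take_of_length_le (by omega)]
  · rw [if_neg hret]
    by_cases hpos : 0 ≤ limit
    · -- limit ≥ 0 and (since the return test failed) len t > limit:
      -- t[:limit] has exactly limit characters, the byte loop never fires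
      have hgt : limit < (t.length : Int) := by
        rw [hlen] at hret
        push Not at hret
        by_contra hle
        push Not at hle
        exact absurd (hret hle) (by omega)
      rw [PySem.List.slice_to t hpos, PySem.List.slice_to t (le_max_right _ _)]
      have hmax : max limit 0 = limit := by omega
      rw [hmax]
      have htake : (t.take limit.toNat).length = limit.toNat := by
        rw [List.length_take]
        omega
      have hlen2 : pvUtf8Len (t.take limit.toNat) = limit.toNat := by
        rw [pvUtf8Len_eq_length _ (fun c hc => hchars c (List.mem_of_mem_take hc)), htake]
      rw [pvTrim, if_neg]
      rw [hlen2, htake]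
      push Not
      intro hcond
      exfalso
      omega
    · -- limit < 0: byte_limit < 0, the loop empties t[:limit]; B takes 0 characters
      push Not at hpos
      have hmax : max limit 0 = 0 := by omega
      rw [hmax, pvTrim_of_neg _ (by omega), PySem.List.slice_to t le_rfl]
      simp

-- ===== VERDICT (by name: the statement is the Claim_ definition above) =====
theorem clamp_text_for_api_spec : Claim_equal_clamp_text_for_api := by
  intro text limit hd
  unfold Spec_clamp_text_for_api
  exact clamp_text_for_api_spec' text limit hd
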